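-- pv_equiv track=rewrite | github.com/jtlai0921/MP11704_example | 03/03-29.py | convert
-- ===== SOURCE A (Python) =====
-- def convert(YearMonthDay):
--     if not isinstance(YearMonthDay, str):
--         return 'Type Error. Must be str'
--     if YearMonthDay.count('-') != 2:
--         return 'Parameter Error. Must contains 2 -'
--     data = YearMonthDay.split('-')
--     if (len(data[0]) != 4) or (len(data[1]) not in (1, 2)) or (len(data[2]) not in (1, 2)):
--         return 'Parameter Error. Must be YYYY-MM-DD'
--     try:
--         year, month, day = map(int, data)
--         quarter = [[3, 4, 5], [6, 7, 8], [9, 10, 11], [12, 1, 2]]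
--         for q, m in enumerate(quarter):
--             if month in m:
--                 return str(year) + str(q+1)
--     except:
--         return 'Parameter Error. Must be YYYY-MM-DD, and all be digits'
-- ===== SOURCE B (Python) =====
-- def convert(YearMonthDay):
--     if not isinstance(YearMonthDay, str):
--         return 'Type Error. Must be str'
--     if YearMonthDay.count('-') != 2:
--         return 'Parameter Error. Must contains 2 -'
--     data = YearMonthDay.split('-')
--     if (len(data[0]) != 4) or (len(data[1]) not in (1, 2)) or (len(data[2]) not in (1, 2)):
--         return 'Parameter Error. Must be YYYY-MM-DD'
--     try:
--         year, month, day = map(int, data)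
--     except ValueError:
--         return 'Parameter Error. Must be YYYY-MM-DD, and all be digits'
--     if 1 <= month <= 12:
--         return str(year) + str((month - 3) // 3 % 4 + 1)
-- ===== Notes on version B (the rewrite author's own statement) =====
-- stated objective: simpler
-- what changed: The quarter is computed by the closed-form arithmetic (month-3)//3%4+1 instead of scanning the four hard-coded month lists with enumerate; the try block shrinks to just the int conversions.
-- outside the precondition, e.g. on convert('2020-13-01'): A returns None, B returns None; on convert('2020-00-01'): A returns None, B returns None
import Mathlib
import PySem

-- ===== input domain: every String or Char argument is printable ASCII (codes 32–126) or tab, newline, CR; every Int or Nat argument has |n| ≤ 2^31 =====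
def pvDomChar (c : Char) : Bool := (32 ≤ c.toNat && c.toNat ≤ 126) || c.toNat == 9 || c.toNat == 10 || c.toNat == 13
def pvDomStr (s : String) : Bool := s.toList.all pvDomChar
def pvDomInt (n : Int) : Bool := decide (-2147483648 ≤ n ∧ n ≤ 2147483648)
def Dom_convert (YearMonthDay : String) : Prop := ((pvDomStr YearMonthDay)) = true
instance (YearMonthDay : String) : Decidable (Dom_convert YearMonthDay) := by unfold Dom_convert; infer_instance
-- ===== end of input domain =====

-- B replaces A's scan over the four hard-coded quarter lists by the closed-form
-- quarter (month - 3) // 3 % 4 + 1; objective: simpler.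

-- ===== PORT A =====
-- the isinstance branch cannot fire (the argument is a String by type) and is omitted.
-- A's for-loop over enumerate(quarter): first list containing month wins; "" stands for
-- Python's None fall-through, which Pre_convert excludes.
def convertLoopA (year month : Int) : List (Int × List Int) → String
  | [] => ""
  | (q, m) :: rest =>
    if month ∈ m then PySem.Int.toStr year ++ PySem.Int.toStr (q + 1)
    else convertLoopA year month rest

def convert (YearMonthDay : String) : String :=
  if PySem.Str.count YearMonthDay "-" ≠ 2 then "Parameter Error. Must contains 2 -"
  else
    let data := (PySem.Str.split? YearMonthDay "-").getD []
    if PySem.Str.len (PySem.List.pyGetD data 0 "") ≠ 4 ∨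
       (PySem.Str.len (PySem.List.pyGetD data 1 "") ∉ ([1, 2] : List Int)) ∨
       (PySem.Str.len (PySem.List.pyGetD data 2 "") ∉ ([1, 2] : List Int)) then
      "Parameter Error. Must be YYYY-MM-DD"
    else
      -- year, month, day = map(int, data): the int() calls run left to right; the
      -- first failure raises ValueError, caught by the bare except
      match PySem.Int.ofStr? (PySem.List.pyGetD data 0 "") with
      | none => "Parameter Error. Must be YYYY-MM-DD, and all be digits"
      | some year =>
        match PySem.Int.ofStr? (PySem.List.pyGetD data 1 "") with
        | none => "Parameter Error. Must be YYYY-MM-DD, and all be digits"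
        | some month =>
          match PySem.Int.ofStr? (PySem.List.pyGetD data 2 "") with
          | none => "Parameter Error. Must be YYYY-MM-DD, and all be digits"
          | some _day =>
            convertLoopA year month
              (PySem.List.enumerate [([3, 4, 5] : List Int), [6, 7, 8], [9, 10, 11], [12, 1, 2]])

-- ===== PORT B =====
def convert_alt (YearMonthDay : String) : String :=
  if PySem.Str.count YearMonthDay "-" ≠ 2 then "Parameter Error. Must contains 2 -"
  else
    let data := (PySem.Str.split? YearMonthDay "-").getD []
    if PySem.Str.len (PySem.List.pyGetD data 0 "") ≠ 4 ∨
       (PySem.Str.len (PySem.List.pyGetD data 1 "") ∉ ([1, 2] : List Int)) ∨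
       (PySem.Str.len (PySem.List.pyGetD data 2 "") ∉ ([1, 2] : List Int)) then
      "Parameter Error. Must be YYYY-MM-DD"
    else
      match PySem.Int.ofStr? (PySem.List.pyGetD data 0 ""),
            PySem.Int.ofStr? (PySem.List.pyGetD data 1 ""),
            PySem.Int.ofStr? (PySem.List.pyGetD data 2 "") with
      | some year, some month, some _day =>
        if 1 ≤ month ∧ month ≤ 12 then
          PySem.Int.toStr year ++
            PySem.Int.toStr (PySem.Int.mod (PySem.Int.floordiv (month - 3) 3) 4 + 1)
        else ""  -- Python's None fall-through, excluded by Pre_convert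
      | _, _, _ => "Parameter Error. Must be YYYY-MM-DD, and all be digits"

-- ===== PRECONDITION & SPEC =====
-- Pre_ excludes exactly the well-formed dates whose month is outside 1..12: there the
-- Python A falls through and returns None, which is not a value of the String type.
def Pre_convert (YearMonthDay : String) : Prop :=
  ¬ (PySem.Str.count YearMonthDay "-" = 2 ∧
     (let data := (PySem.Str.split? YearMonthDay "-").getD []
      PySem.Str.len (PySem.List.pyGetD data 0 "") = 4 ∧
      PySem.Str.len (PySem.List.pyGetD data 1 "") ∈ ([1, 2] : List Int) ∧
      PySem.Str.len (PySem.List.pyGetD data 2 "") ∈ ([1, 2] : List Int) ∧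
      (PySem.Int.ofStr? (PySem.List.pyGetD data 0 "")).isSome ∧
      (PySem.Int.ofStr? (PySem.List.pyGetD data 2 "")).isSome ∧
      (∃ m, PySem.Int.ofStr? (PySem.List.pyGetD data 1 "") = some m ∧ ¬ (1 ≤ m ∧ m ≤ 12))))
instance (YearMonthDay : String) : Decidable (Pre_convert YearMonthDay) := by
  unfold Pre_convert; infer_instance

def pvWitness_convert : String := "2020-07-15"

def Spec_convert (YearMonthDay : String) (out : String) : Prop := out = convert_alt YearMonthDay
instance (YearMonthDay : String) (out : String) : Decidable (Spec_convert YearMonthDay out) := by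
  unfold Spec_convert; infer_instance

-- ===== CLAIM (what is proved, stated in full; the proofs are below) =====
def Claim_equal_convert : Prop := ∀ (YearMonthDay : String), Dom_convert YearMonthDay → Pre_convert YearMonthDay → Spec_convert YearMonthDay (convert YearMonthDay)

-- ===== LEMMAS AND PROOFS =====

-- for a month in 1..12 the scan over the quarter lists equals the closed form
theorem loopA_eq_closed (year month : Int) (h1 : 1 ≤ month) (h2 : month ≤ 12) :
    convertLoopA year month
      (PySem.List.enumerate [([3, 4, 5] : List Int), [6, 7, 8], [9, 10, 11], [12, 1, 2]]) =
    PySem.Int.toStr year ++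
      PySem.Int.toStr (PySem.Int.mod (PySem.Int.floordiv (month - 3) 3) 4 + 1) := by
  interval_cases month <;> rfl

-- ===== VERDICT (by name: the statement is the Claim_ definition above) =====
theorem convert_spec : Claim_equal_convert := by
  intro s _hdom hpre
  unfold Spec_convert convert convert_alt
  unfold Pre_convert at hpre
  rcases eq_or_ne (PySem.Str.count s "-") 2 with hc | hc
  · rw [if_neg (not_not_intro hc), if_neg (not_not_intro hc)]
    by_cases hl : PySem.Str.len (PySem.List.pyGetD ((PySem.Str.split? s "-").getD []) 0 "") ≠ 4 ∨
       (PySem.Str.len (PySem.List.pyGetD ((PySem.Str.split? s "-").getD []) 1 "") ∉ ([1, 2] : List Int)) ∨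
       (PySem.Str.len (PySem.List.pyGetD ((PySem.Str.split? s "-").getD []) 2 "") ∉ ([1, 2] : List Int))
    · rw [if_pos hl, if_pos hl]
    · rw [if_neg hl, if_neg hl]
      push Not at hl
      obtain ⟨h0, h1, h2⟩ := hl
      cases hp0 : PySem.Int.ofStr? (PySem.List.pyGetD ((PySem.Str.split? s "-").getD []) 0 "") with
      | none => rfl
      | some year =>
        cases hp1 : PySem.Int.ofStr? (PySem.List.pyGetD ((PySem.Str.split? s "-").getD []) 1 "") with
        | none => rfl
        | some month =>
          cases hp2 : PySem.Int.ofStr? (PySem.List.pyGetD ((PySem.Str.split? s "-").getD []) 2 "") with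
          | none => rfl
          | some day =>
            have hm : 1 ≤ month ∧ month ≤ 12 := by
              by_contra hmn
              exact hpre ⟨hc, h0, h1, h2, by simp [hp0], by simp [hp2], month, hp1, hmn⟩
            show convertLoopA year month _ = if 1 ≤ month ∧ month ≤ 12 then _ else ""
            rw [if_pos hm]
            exact loopA_eq_closed year month hm.1 hm.2
  · rw [if_pos hc, if_pos hc]
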